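-- pv_equiv track=rewrite | github.com/rutgerva/advent-of-code-2024 | modules/day_07/part_01.py | construct_equation
-- ===== SOURCE A (Python) =====
-- def construct_equation(operands, t_value, cur_total):
--     #Stop condition 1 all operands used
--     if len(operands) == 0:
--         return cur_total == t_value
--     #Stop condition 2: both options exceed Test value
--     if cur_total * int(operands[0]) > t_value and cur_total + int(operands[0]) > t_value:
--         return False
--     #if multiply fails, then plus must hold
--     if cur_total * int(operands[0]) > t_value:
--         return construct_equation(operands[1:], t_value, cur_total + int(operands[0])) # Stop condition 3, only option left to create a valid equation from this point
--     else:
--         return construct_equation(operands[1:], t_value, cur_total * int(operands[0])) or construct_equation(operands[1:], t_value, cur_total + int(operands[0]))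
-- ===== SOURCE B (Python) =====
-- def construct_equation(operands, t_value, cur_total):
--     # Iterative frontier search with dedup: keep the SET of surviving running
--     # totals after each operand (same pruning rules as the recursive search),
--     # then test membership of the target at the end.
--     cur = {cur_total}
--     for x in operands:
--         nxt = set()
--         for c in cur:
--             if c * x > t_value and c + x > t_value:
--                 continue
--             if c * x > t_value:
--                 nxt.add(c + x)
--             else:
--                 nxt.add(c * x)
--                 nxt.add(c + x)
--         cur = nxt
--     return t_value in cur
-- ===== Notes on version B (the rewrite author's own statement) =====
-- stated objective: alternative
-- what changed: Replaces the branching recursion by an iterative breadth-first frontier that keeps a deduplicated set of reachable running totals per operand position and tests target membership once at the end.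
import Mathlib
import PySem

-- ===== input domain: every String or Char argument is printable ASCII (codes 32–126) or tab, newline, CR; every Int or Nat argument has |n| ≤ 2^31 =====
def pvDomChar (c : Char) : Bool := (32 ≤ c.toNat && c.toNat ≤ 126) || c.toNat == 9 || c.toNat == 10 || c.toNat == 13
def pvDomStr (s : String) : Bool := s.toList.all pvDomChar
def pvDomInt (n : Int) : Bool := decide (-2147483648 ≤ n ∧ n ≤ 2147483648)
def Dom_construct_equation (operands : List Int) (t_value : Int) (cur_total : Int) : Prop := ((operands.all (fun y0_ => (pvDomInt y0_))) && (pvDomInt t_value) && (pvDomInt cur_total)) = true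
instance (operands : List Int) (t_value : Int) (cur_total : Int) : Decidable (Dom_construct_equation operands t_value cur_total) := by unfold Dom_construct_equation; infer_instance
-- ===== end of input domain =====

-- B replaces the branching recursion by an iterative per-operand frontier of
-- deduplicated reachable running totals (same pruning rules); objective: alternative.

-- ===== PORT A =====
def construct_equation (operands : List Int) (t_value : Int) (cur_total : Int) : Bool :=
  match operands with
  | [] => cur_total == t_value
  | x :: rest =>
    if cur_total * x > t_value ∧ cur_total + x > t_value then false
    else if cur_total * x > t_value then construct_equation rest t_value (cur_total + x)
    else construct_equation rest t_value (cur_total * x) || construct_equation rest t_value (cur_total + x)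

-- ===== PORT B =====
-- one step of the frontier loop: the inner 'for c in cur' of Source B
def pvStep (t_value : Int) (cur : PySem.Set Int) (x : Int) : PySem.Set Int :=
  cur.foldl (fun nxt c =>
    if c * x > t_value ∧ c + x > t_value then nxt
    else if c * x > t_value then PySem.Set.add nxt (c + x)
    else PySem.Set.add (PySem.Set.add nxt (c * x)) (c + x)) PySem.Set.empty

def construct_equation_alt (operands : List Int) (t_value : Int) (cur_total : Int) : Bool :=
  PySem.Set.contains (operands.foldl (pvStep t_value) (PySem.Set.ofList [cur_total])) t_value

-- ===== PRECONDITION & SPEC =====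
def Spec_construct_equation (operands : List Int) (t_value : Int) (cur_total : Int) (out : Bool) : Prop := out = construct_equation_alt operands t_value cur_total
instance (operands : List Int) (t_value : Int) (cur_total : Int) (out : Bool) : Decidable (Spec_construct_equation operands t_value cur_total out) := by unfold Spec_construct_equation; infer_instance

-- ===== CLAIM (what is proved, stated in full; the proofs are below) =====
def Claim_equal_construct_equation : Prop := ∀ (operands : List Int) (t_value : Int) (cur_total : Int), Dom_construct_equation operands t_value cur_total → Spec_construct_equation operands t_value cur_total (construct_equation operands t_value cur_total)

-- ===== LEMMAS AND PROOFS =====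

-- the children a running total c produces under A's pruning rules (proof-only helper)
def pvChildren (t_value x c : Int) : List Int :=
  if c * x > t_value ∧ c + x > t_value then []
  else if c * x > t_value then [c + x]
  else [c * x, c + x]

lemma mem_one_step (t_value x c v : Int) (nxt : PySem.Set Int) :
    v ∈ (if c * x > t_value ∧ c + x > t_value then nxt
         else if c * x > t_value then PySem.Set.add nxt (c + x)
         else PySem.Set.add (PySem.Set.add nxt (c * x)) (c + x))
    ↔ v ∈ nxt ∨ v ∈ pvChildren t_value x c := by
  unfold pvChildren
  split_ifs <;> simp [PySem.Set.mem_add, or_assoc]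

lemma mem_step_aux (t_value x : Int) (s acc : List Int) (v : Int) :
    v ∈ s.foldl (fun nxt c =>
      if c * x > t_value ∧ c + x > t_value then nxt
      else if c * x > t_value then PySem.Set.add nxt (c + x)
      else PySem.Set.add (PySem.Set.add nxt (c * x)) (c + x)) acc
    ↔ v ∈ acc ∨ ∃ c ∈ s, v ∈ pvChildren t_value x c := by
  induction s generalizing acc with
  | nil => simp
  | cons c s ih =>
    rw [List.foldl_cons, ih, List.exists_mem_cons_iff, mem_one_step]
    tauto

lemma mem_step (t_value x : Int) (s : PySem.Set Int) (v : Int) :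
    v ∈ pvStep t_value s x ↔ ∃ c ∈ s, v ∈ pvChildren t_value x c := by
  simpa [PySem.Set.empty] using mem_step_aux t_value x s PySem.Set.empty v

lemma children_A (rest : List Int) (t_value x c : Int) :
    (∃ c' ∈ pvChildren t_value x c, construct_equation rest t_value c' = true)
    ↔ construct_equation (x :: rest) t_value c = true := by
  simp only [pvChildren, construct_equation]
  split_ifs with h1 h2 <;> simp

lemma frontier_key (operands : List Int) (t_value : Int) (S : List Int) :
    t_value ∈ operands.foldl (pvStep t_value) S
    ↔ ∃ c ∈ S, construct_equation operands t_value c = true := by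
  induction operands generalizing S with
  | nil =>
    simp only [List.foldl_nil, construct_equation, beq_iff_eq]
    simp
  | cons x rest ih =>
    rw [List.foldl_cons, ih]
    constructor
    · rintro ⟨c', hc', hA⟩
      obtain ⟨c, hc, hch⟩ := (mem_step t_value x S c').1 hc'
      exact ⟨c, hc, (children_A rest t_value x c).1 ⟨c', hch, hA⟩⟩
    · rintro ⟨c, hc, hA⟩
      obtain ⟨c', hch, hA'⟩ := (children_A rest t_value x c).2 hA
      exact ⟨c', (mem_step t_value x S c').2 ⟨c, hc, hch⟩, hA'⟩

-- ===== VERDICT (by name: the statement is the Claim_ definition above) =====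
theorem construct_equation_spec : Claim_equal_construct_equation := by
  intro operands t_value cur_total _
  unfold Spec_construct_equation construct_equation_alt
  have hof : PySem.Set.ofList [cur_total] = ([cur_total] : List Int) := by
    simp [PySem.Set.ofList, PySem.Set.add, PySem.Set.empty]
  rw [hof]
  have h := frontier_key operands t_value [cur_total]
  simp only [List.mem_singleton, exists_eq_left] at h
  cases hb : construct_equation operands t_value cur_total with
  | false =>
    have : t_value ∉ operands.foldl (pvStep t_value) [cur_total] := by
      simp [h, hb]
    simp [PySem.Set.contains, this]
  | true =>
    exact ((PySem.Set.contains_iff _ _).2 (h.2 hb)).symm
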